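-- pv_equiv track=rewrite | github.com/GiorgosPerrakis/My-Code | Python/Project 1/present_bias.py | find_min_path
-- ===== SOURCE A (Python) =====
-- paths = []                                                                      # list of lists where we keep all the paths
--
-- def find_min_path(paths):                                                       # function that finds the minimum path
--     min_path = paths[0]
--     min_cost = min_path[-1]
--     for k in paths:
--         temp = k[-1]
--         if (temp < min_cost):
--             min_cost = temp
--     for path_list in paths:                                                     # go through the lists with the paths
--         if (path_list[-1] == min_cost):                                         # and find the path with the minimum cost
--             return (path_list[0:(len(path_list)-1)], path_list[-1])             # tha was calculated before
-- ===== SOURCE B (Python) =====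
-- def find_min_path(paths):
--     best = paths[0]
--     best_cost = best[-1]
--     for p in paths:
--         c = p[-1]
--         if c < best_cost:
--             best = p
--             best_cost = c
--     return (best[:-1], best_cost)
-- ===== Notes on version B (the rewrite author's own statement) =====
-- stated objective: simpler
-- what changed: Replaced A's two separate passes (one to compute the minimum final cost, one to search for the first path with that cost) by a single pass that tracks the current best path and its cost, updating on strict < so the first minimum still wins.
import Mathlib
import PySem

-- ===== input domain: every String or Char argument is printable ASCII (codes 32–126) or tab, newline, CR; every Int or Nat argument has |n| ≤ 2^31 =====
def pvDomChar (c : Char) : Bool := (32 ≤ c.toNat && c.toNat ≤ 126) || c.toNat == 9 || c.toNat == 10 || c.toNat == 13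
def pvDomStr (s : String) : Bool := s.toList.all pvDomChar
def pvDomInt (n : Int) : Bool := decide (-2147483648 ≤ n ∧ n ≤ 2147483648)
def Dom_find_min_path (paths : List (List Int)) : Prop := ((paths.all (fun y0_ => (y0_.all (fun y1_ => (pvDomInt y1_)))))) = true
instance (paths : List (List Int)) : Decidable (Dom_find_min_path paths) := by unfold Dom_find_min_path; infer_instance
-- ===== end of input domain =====

-- B replaces A's two passes (min of final costs, then first path with that cost) by one
-- tracking pass over the paths; objective: simpler.

-- k[-1] (guaranteed in range inside Pre_; the default is never reached there)
def pyLastD (p : List Int) : Int := (PySem.List.pyGet? p (-1)).getD 0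

-- ===== PORT A =====
-- A's first loop: min_cost accumulation
def stepMinA (mc : Int) (k : List Int) : Int := if pyLastD k < mc then pyLastD k else mc

-- A's second loop: first path whose last element equals min_cost (Python falls off the
-- end returning None only outside Pre_; ([], 0) stands for that unreachable case)
def findA : List (List Int) → Int → List Int × Int
  | [], _ => ([], 0)
  | p :: rest, mc =>
      if pyLastD p = mc then
        (PySem.List.slice p (some 0) (some ((p.length : Int) - 1)), pyLastD p)
      else findA rest mc

def find_min_path (paths : List (List Int)) : List Int × Int :=
  match paths with
  | [] => ([], 0)   -- paths[0] raises IndexError in Python; excluded by Pre_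
  | p0 :: _ =>
      let min_cost := paths.foldl stepMinA (pyLastD p0)
      findA paths min_cost

-- ===== PORT B =====
-- B's single loop: state = (best, best_cost)
def stepB (st : List Int × Int) (p : List Int) : List Int × Int :=
  if pyLastD p < st.2 then (p, pyLastD p) else st

def find_min_path_alt (paths : List (List Int)) : List Int × Int :=
  match paths with
  | [] => ([], 0)   -- paths[0] raises IndexError in Python; excluded by Pre_
  | p0 :: _ =>
      let st := paths.foldl stepB (p0, pyLastD p0)
      (PySem.List.slice st.1 none (some (-1)), st.2)

-- ===== PRECONDITION & SPEC =====
-- Pre_ excludes exactly the inputs where Python A raises IndexError: an empty paths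
-- list (paths[0]) or any empty inner path (k[-1]).
def Pre_find_min_path (paths : List (List Int)) : Prop :=
  paths ≠ [] ∧ ∀ p ∈ paths, p ≠ []
instance (paths : List (List Int)) : Decidable (Pre_find_min_path paths) := by
  unfold Pre_find_min_path; infer_instance

def pvWitness_find_min_path : List (List Int) := [[1, 2], [3, 0], [4, 0]]

def Spec_find_min_path (paths : List (List Int)) (out : List Int × Int) : Prop := out = find_min_path_alt paths
instance (paths : List (List Int)) (out : List Int × Int) : Decidable (Spec_find_min_path paths out) := by unfold Spec_find_min_path; infer_instance

-- ===== CLAIM =====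
def Claim_equal_find_min_path : Prop := ∀ (paths : List (List Int)), Dom_find_min_path paths → Pre_find_min_path paths → Spec_find_min_path paths (find_min_path paths)

-- ===== LEMMAS AND PROOFS =====

lemma foldMin_le (l : List (List Int)) : ∀ c : Int, l.foldl stepMinA c ≤ c := by
  induction l with
  | nil => intro c; simp
  | cons p l ih =>
      intro c
      have h := ih (stepMinA c p)
      have : stepMinA c p ≤ c := by unfold stepMinA; split <;> omega
      simpa using le_trans h this

lemma sliceA_eq_dropLast (p : List Int) :
    PySem.List.slice p (some 0) (some ((p.length : Int) - 1)) = p.dropLast := by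
  cases p with
  | nil => simp [PySem.List.slice]
  | cons x xs =>
      simp only [PySem.List.slice_zero_start]
      have h0 : (0:Int) ≤ (x :: xs).length - 1 := by simp
      rw [PySem.List.slice_to _ h0]
      have : (((x :: xs).length : Int) - 1).toNat = (x :: xs).length - 1 := by
        simp
      rw [this, ← List.dropLast_eq_take]

lemma findA_cons (p : List Int) (rest : List (List Int)) (mc : Int) :
    findA (p :: rest) mc =
      if pyLastD p = mc then
        (PySem.List.slice p (some 0) (some ((p.length : Int) - 1)), pyLastD p)
      else findA rest mc := rfl

lemma main_inv (l : List (List Int)) : ∀ b : List Int,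
    (l.foldl stepB (b, pyLastD b)).2 = pyLastD (l.foldl stepB (b, pyLastD b)).1
    ∧ (l.foldl stepB (b, pyLastD b)).2 = l.foldl stepMinA (pyLastD b)
    ∧ findA (b :: l) (l.foldl stepMinA (pyLastD b)) =
        (PySem.List.slice ((l.foldl stepB (b, pyLastD b)).1) (some 0)
          (some ((((l.foldl stepB (b, pyLastD b)).1.length : Int)) - 1)),
         pyLastD (l.foldl stepB (b, pyLastD b)).1) := by
  induction l with
  | nil =>
      intro b
      refine ⟨rfl, rfl, ?_⟩
      rw [findA_cons]
      simp only [List.foldl_nil, if_true]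
  | cons p l ih =>
      intro b
      by_cases h : pyLastD p < pyLastD b
      · -- p becomes the new best
        have hstep : stepB (b, pyLastD b) p = (p, pyLastD p) := by
          unfold stepB; simp [h]
        have hmin : stepMinA (pyLastD b) p = pyLastD p := by
          unfold stepMinA; simp [h]
        have hmc : (p :: l).foldl stepMinA (pyLastD b) = l.foldl stepMinA (pyLastD p) := by
          simp [hmin]
        have hst : (p :: l).foldl stepB (b, pyLastD b) = l.foldl stepB (p, pyLastD p) := by
          simp [hstep]
        obtain ⟨i1, i2, i3⟩ := ih p
        refine ⟨by rw [hst]; exact i1, by rw [hst, hmc]; exact i2, ?_⟩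
        rw [hmc, hst]
        -- findA skips b since its last is strictly above the minimum
        have hble : l.foldl stepMinA (pyLastD p) ≤ pyLastD p := foldMin_le l _
        have hne : pyLastD b ≠ l.foldl stepMinA (pyLastD p) := by omega
        calc findA (b :: p :: l) (l.foldl stepMinA (pyLastD p))
            = findA (p :: l) (l.foldl stepMinA (pyLastD p)) := by
              rw [findA_cons, if_neg hne]
          _ = _ := i3
      · -- best unchanged
        have hstep : stepB (b, pyLastD b) p = (b, pyLastD b) := by
          unfold stepB; simp [h]
        have hmin : stepMinA (pyLastD b) p = pyLastD b := by
          unfold stepMinA; simp [h]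
        have hmc : (p :: l).foldl stepMinA (pyLastD b) = l.foldl stepMinA (pyLastD b) := by
          simp [hmin]
        have hst : (p :: l).foldl stepB (b, pyLastD b) = l.foldl stepB (b, pyLastD b) := by
          simp [hstep]
        obtain ⟨i1, i2, i3⟩ := ih b
        refine ⟨by rw [hst]; exact i1, by rw [hst, hmc]; exact i2, ?_⟩
        rw [hmc, hst]
        by_cases hb : pyLastD b = l.foldl stepMinA (pyLastD b)
        · -- b itself is the answer on both sides
          have e1 : findA (b :: p :: l) (l.foldl stepMinA (pyLastD b)) =
              (PySem.List.slice b (some 0) (some ((b.length : Int) - 1)), pyLastD b) := by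
            rw [findA_cons, if_pos hb]
          have e2 : findA (b :: l) (l.foldl stepMinA (pyLastD b)) =
              (PySem.List.slice b (some 0) (some ((b.length : Int) - 1)), pyLastD b) := by
            rw [findA_cons, if_pos hb]
          rw [e1, ← e2]; exact i3
        · -- neither b nor p matches the minimum
          have hple : l.foldl stepMinA (pyLastD b) ≤ pyLastD b := foldMin_le l _
          have hbp : pyLastD b ≤ pyLastD p := by omega
          have hpne : pyLastD p ≠ l.foldl stepMinA (pyLastD b) := by omega
          calc findA (b :: p :: l) (l.foldl stepMinA (pyLastD b))
              = findA l (l.foldl stepMinA (pyLastD b)) := by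
                rw [findA_cons, if_neg hb, findA_cons, if_neg hpne]
            _ = findA (b :: l) (l.foldl stepMinA (pyLastD b)) := by
                rw [findA_cons (mc := l.foldl stepMinA (pyLastD b)) b l, if_neg hb]
            _ = _ := i3

-- ===== VERDICT =====
theorem find_min_path_spec : Claim_equal_find_min_path := by
  intro paths _ _
  unfold Spec_find_min_path find_min_path find_min_path_alt
  cases paths with
  | nil => rfl
  | cons p0 rest =>
      simp only
      have hstep0 : stepB (p0, pyLastD p0) p0 = (p0, pyLastD p0) := by
        unfold stepB; simp
      have hmin0 : stepMinA (pyLastD p0) p0 = pyLastD p0 := by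
        unfold stepMinA; simp
      obtain ⟨i1, i2, i3⟩ := main_inv rest p0
      rw [List.foldl_cons, List.foldl_cons, hstep0, hmin0, i3,
        sliceA_eq_dropLast, PySem.List.slice_to_neg_one, i1]
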